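-- pv_equiv track=rewrite | github.com/eddiethedean/ryact | scripts/apply_parity_burndown_inventory.py | _patch_wave_burndown_v8_react_manifest_slices
-- ===== SOURCE A (Python) =====
-- _BURNDOWN_V8_REACT_IMPLEMENTATIONS: tuple[tuple[str, str, str], ...] = (
--     (
--         "react.ReactIncrementalSideEffects-test.reactincrementalsideeffects."
--         "can_delete_a_child_that_changes_type_implicit_keys",
--         "react.incrementalSideEffects.childTagChangeImplicitKey",
--         "tests_upstream/react/test_incremental_side_effects_child_type_change_implicit_key.py",
--     ),
--     (
--         "react.ReactElementValidator-test.internal.reactelementvalidator."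
--         "warns_for_keys_for_arrays_of_elements_with_owner_info",
--         "react.elementValidator.arrayRestArgsMissingKeysOwnerInfoWarn",
--         "tests_upstream/react/test_element_validator_keys_rest_missing_warn_more.py",
--     ),
--     (
--         "react.ReactIncrementalErrorHandling-test.internal.reactincrementalerrorhandling."
--         "provides_component_stack_to_the_error_boundary_with_componentdidcatch",
--         "react.incrementalErrorHandling.didCatchReceivesComponentStack",
--         "tests_upstream/react/test_incremental_error_did_catch_component_stack.py",
--     ),
--     (
--         "react.ReactIncrementalSideEffects-test.reactincrementalsideeffects."
--         "can_deletes_children_either_components_host_or_text",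
--         "react.incrementalSideEffects.deletesMixedTextHostAndComponentChildren",
--         "tests_upstream/react/test_incremental_side_effects_delete_mixed_children.py",
--     ),
-- )
--
-- def _patch_wave_burndown_v8_react_manifest_slices(cases: list[dict]) -> int:
--     changed = 0
--     for row_id, manifest_id, py_test in _BURNDOWN_V8_REACT_IMPLEMENTATIONS:
--         for c in cases:
--             if c.get("id") != row_id or c.get("status") != "pending":
--                 continue
--             c["status"] = "implemented"
--             c["manifest_id"] = manifest_id
--             c["python_test"] = py_test
--             c["non_goal_rationale"] = None
--             changed += 1
--             break
--     return changed
-- ===== SOURCE B (Python) =====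
-- _BURNDOWN_V8_REACT_IMPLEMENTATIONS: tuple[tuple[str, str, str], ...] = (
--     (
--         "react.ReactIncrementalSideEffects-test.reactincrementalsideeffects."
--         "can_delete_a_child_that_changes_type_implicit_keys",
--         "react.incrementalSideEffects.childTagChangeImplicitKey",
--         "tests_upstream/react/test_incremental_side_effects_child_type_change_implicit_key.py",
--     ),
--     (
--         "react.ReactElementValidator-test.internal.reactelementvalidator."
--         "warns_for_keys_for_arrays_of_elements_with_owner_info",
--         "react.elementValidator.arrayRestArgsMissingKeysOwnerInfoWarn",
--         "tests_upstream/react/test_element_validator_keys_rest_missing_warn_more.py",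
--     ),
--     (
--         "react.ReactIncrementalErrorHandling-test.internal.reactincrementalerrorhandling."
--         "provides_component_stack_to_the_error_boundary_with_componentdidcatch",
--         "react.incrementalErrorHandling.didCatchReceivesComponentStack",
--         "tests_upstream/react/test_incremental_error_did_catch_component_stack.py",
--     ),
--     (
--         "react.ReactIncrementalSideEffects-test.reactincrementalsideeffects."
--         "can_deletes_children_either_components_host_or_text",
--         "react.incrementalSideEffects.deletesMixedTextHostAndComponentChildren",
--         "tests_upstream/react/test_incremental_side_effects_delete_mixed_children.py",
--     ),
-- )
--
--
-- def _patch_wave_burndown_v8_react_manifest_slices(cases: list[dict]) -> int: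
--     # Inverted control flow: one pass over cases, with the manifest rows held in
--     # a dict keyed by row id; popping a matched id reproduces the original's
--     # one-shot (break) semantics per manifest row.
--     pending = {rid: (mid, pyt) for rid, mid, pyt in _BURNDOWN_V8_REACT_IMPLEMENTATIONS}
--     changed = 0
--     for c in cases:
--         if c.get("status") != "pending":
--             continue
--         info = pending.pop(c.get("id"), None)
--         if info is None:
--             continue
--         c["status"] = "implemented"
--         c["manifest_id"], c["python_test"] = info
--         c["non_goal_rationale"] = None
--         changed += 1
--     return changed
-- ===== Notes on version B (the rewrite author's own statement) =====
-- stated objective: alternative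
-- what changed: Inverts the loop nesting: instead of scanning all cases once per manifest row, B builds a dict keyed by row id from the manifest and makes a single pass over cases, popping a matched id so each manifest row fires at most once, exactly like A's per-row break.
import Mathlib
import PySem

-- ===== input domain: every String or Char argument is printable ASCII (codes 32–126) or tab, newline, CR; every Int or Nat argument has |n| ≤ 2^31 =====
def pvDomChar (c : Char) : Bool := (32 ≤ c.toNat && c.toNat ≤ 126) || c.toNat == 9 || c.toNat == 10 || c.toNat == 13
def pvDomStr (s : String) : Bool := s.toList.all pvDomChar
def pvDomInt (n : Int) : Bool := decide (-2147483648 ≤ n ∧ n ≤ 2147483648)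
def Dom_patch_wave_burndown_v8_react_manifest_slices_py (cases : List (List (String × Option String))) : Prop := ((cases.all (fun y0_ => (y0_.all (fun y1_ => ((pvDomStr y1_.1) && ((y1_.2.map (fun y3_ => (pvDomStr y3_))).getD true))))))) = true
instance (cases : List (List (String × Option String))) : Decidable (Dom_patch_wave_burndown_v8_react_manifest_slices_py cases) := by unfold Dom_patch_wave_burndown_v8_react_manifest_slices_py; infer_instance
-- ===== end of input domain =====

-- B inverts A's control flow: one pass over `cases` consulting (and popping from) a dict of
-- manifest rows keyed by id, instead of A's scan of all cases per manifest row; same return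
-- value, and both Pythons perform the same in-place mutation of the matched case dicts
-- (the equivalence proved here is about the return value; the mutation is not modeled).

-- the module-level constant _BURNDOWN_V8_REACT_IMPLEMENTATIONS, shared by both ports
def pvRows : List (String × String × String) :=
  [ ("react.ReactIncrementalSideEffects-test.reactincrementalsideeffects.can_delete_a_child_that_changes_type_implicit_keys",
     "react.incrementalSideEffects.childTagChangeImplicitKey",
     "tests_upstream/react/test_incremental_side_effects_child_type_change_implicit_key.py"),
    ("react.ReactElementValidator-test.internal.reactelementvalidator.warns_for_keys_for_arrays_of_elements_with_owner_info",
     "react.elementValidator.arrayRestArgsMissingKeysOwnerInfoWarn",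
     "tests_upstream/react/test_element_validator_keys_rest_missing_warn_more.py"),
    ("react.ReactIncrementalErrorHandling-test.internal.reactincrementalerrorhandling.provides_component_stack_to_the_error_boundary_with_componentdidcatch",
     "react.incrementalErrorHandling.didCatchReceivesComponentStack",
     "tests_upstream/react/test_incremental_error_did_catch_component_stack.py"),
    ("react.ReactIncrementalSideEffects-test.reactincrementalsideeffects.can_deletes_children_either_components_host_or_text",
     "react.incrementalSideEffects.deletesMixedTextHostAndComponentChildren",
     "tests_upstream/react/test_incremental_side_effects_delete_mixed_children.py") ]

-- ===== PORT A =====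
-- c["status"]=…; c["manifest_id"]=…; c["python_test"]=…; c["non_goal_rationale"]=None
def pvPatchCase (c : List (String × Option String)) (mid pyt : String) : List (String × Option String) :=
  (((((PySem.Dict.mk c).insert "status" (some "implemented")).insert "manifest_id" (some mid)).insert
      "python_test" (some pyt)).insert "non_goal_rationale" none).items

-- A's inner `for c in cases: … break`: returns the updated cases list and whether it fired
def pvInnerA (rid mid pyt : String) : List (List (String × Option String)) →
    List (List (String × Option String)) × Bool
  | [] => ([], false)
  | c :: rest =>
    if (PySem.Dict.mk c).get? "id" ≠ some (some rid) ∨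
       (PySem.Dict.mk c).get? "status" ≠ some (some "pending") then
      let p := pvInnerA rid mid pyt rest
      (c :: p.1, p.2)
    else
      (pvPatchCase c mid pyt :: rest, true)

-- A's outer loop over the manifest rows, threading the (mutated) cases list and `changed`
def pvOuterA : List (String × String × String) → List (List (String × Option String)) → Int → Int
  | [], _, changed => changed
  | (rid, mid, pyt) :: rows, cs, changed =>
    let p := pvInnerA rid mid pyt cs
    pvOuterA rows p.1 (if p.2 then changed + 1 else changed)

def patch_wave_burndown_v8_react_manifest_slices_py (cases : List (List (String × Option String))) : Int :=
  pvOuterA pvRows cases 0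

-- ===== PORT B =====
-- B's single loop over cases: `pending.pop(c.get("id"), None)` fires at most once per id
def pvLoopB : PySem.Dict String (String × String) → Int → List (List (String × Option String)) → Int
  | _, changed, [] => changed
  | pending, changed, c :: rest =>
    if (PySem.Dict.mk c).get? "status" ≠ some (some "pending") then
      pvLoopB pending changed rest
    else
      match (PySem.Dict.mk c).get? "id" with
      | some (some rid) =>
        match pending.pop? rid with
        | some (_, pending') => pvLoopB pending' (changed + 1) rest
        | none => pvLoopB pending changed rest
      | _ => pvLoopB pending changed rest

def patch_wave_burndown_v8_react_manifest_slices_py_alt (cases : List (List (String × Option String))) : Int :=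
  pvLoopB (pvRows.foldl (fun d r => d.insert r.1 (r.2.1, r.2.2)) PySem.Dict.empty) 0 cases

-- ===== PRECONDITION & SPEC =====
def Spec_patch_wave_burndown_v8_react_manifest_slices_py (cases : List (List (String × Option String))) (out : Int) : Prop := out = patch_wave_burndown_v8_react_manifest_slices_py_alt cases
instance (cases : List (List (String × Option String))) (out : Int) : Decidable (Spec_patch_wave_burndown_v8_react_manifest_slices_py cases out) := by unfold Spec_patch_wave_burndown_v8_react_manifest_slices_py; infer_instance

-- ===== CLAIM (what is proved, stated in full; the proofs are below) =====
def Claim_equal_patch_wave_burndown_v8_react_manifest_slices_py : Prop := ∀ (cases : List (List (String × Option String))), Dom_patch_wave_burndown_v8_react_manifest_slices_py cases → Spec_patch_wave_burndown_v8_react_manifest_slices_py cases (patch_wave_burndown_v8_react_manifest_slices_py cases)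

-- ===== LEMMAS AND PROOFS =====

-- does case c match manifest row id `rid` (pending with that id)?
def pvMatch (c : List (String × Option String)) (rid : String) : Bool :=
  ((PySem.Dict.mk c).get? "id" == some (some rid)) &&
  ((PySem.Dict.mk c).get? "status" == some (some "pending"))

-- number of manifest rows that have a matching case in cs
def pvCount (rows : List (String × String × String)) (cs : List (List (String × Option String))) : Int :=
  ((rows.filter (fun r => cs.any (fun c => pvMatch c r.1))).length : Int)

lemma pvMatch_patch (c : List (String × Option String)) (mid pyt x : String) :
    pvMatch (pvPatchCase c mid pyt) x
      = (((PySem.Dict.mk c).get? "id" == some (some x)) && false) := by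
  simp only [pvMatch, pvPatchCase]
  rw [show ∀ (d : PySem.Dict String (Option String)), PySem.Dict.mk d.items = d from fun _ => rfl]
  rw [PySem.Dict.get?_insert_of_ne _ _ (by decide),
      PySem.Dict.get?_insert_of_ne _ _ (by decide),
      PySem.Dict.get?_insert_of_ne _ _ (by decide),
      PySem.Dict.get?_insert_of_ne _ _ (by decide),
      PySem.Dict.get?_insert_of_ne _ _ (by decide),
      PySem.Dict.get?_insert_of_ne _ _ (by decide),
      PySem.Dict.get?_insert_of_ne _ _ (by decide),
      PySem.Dict.get?_insert_self]
  simp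

lemma pvInnerA_fired (rid mid pyt : String) (cs : List (List (String × Option String))) :
    (pvInnerA rid mid pyt cs).2 = cs.any (fun c => pvMatch c rid) := by
  induction cs with
  | nil => rfl
  | cons c rest ih =>
    by_cases h : (PySem.Dict.mk c).get? "id" ≠ some (some rid) ∨
        (PySem.Dict.mk c).get? "status" ≠ some (some "pending")
    · have hm : pvMatch c rid = false := by
        simp only [pvMatch]
        rcases h with h | h <;> simp [h]
      simp [pvInnerA, if_pos h, hm, ih]
    · have hn := h
      push Not at h
      simp [pvInnerA, pvMatch, h.1, h.2]

lemma pvInnerA_preserve (rid mid pyt x : String) (hx : x ≠ rid)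
    (cs : List (List (String × Option String))) :
    ((pvInnerA rid mid pyt cs).1).any (fun c => pvMatch c x) = cs.any (fun c => pvMatch c x) := by
  induction cs with
  | nil => rfl
  | cons c rest ih =>
    by_cases h : (PySem.Dict.mk c).get? "id" ≠ some (some rid) ∨
        (PySem.Dict.mk c).get? "status" ≠ some (some "pending")
    · simp [pvInnerA, if_pos h, ih]
    · have hn := h
      push Not at h
      have hcx : pvMatch c x = false := by
        simp only [pvMatch, h.1]
        simp [Ne.symm hx]
      simp [pvInnerA, h.1, h.2, hcx, pvMatch_patch]

lemma pvCount_congr (rows : List (String × String × String))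
    (cs cs' : List (List (String × Option String)))
    (h : ∀ r ∈ rows, cs'.any (fun c => pvMatch c r.1) = cs.any (fun c => pvMatch c r.1)) :
    pvCount rows cs' = pvCount rows cs := by
  unfold pvCount
  rw [List.filter_congr (fun r hr => h r hr)]

lemma pvOuterA_eq (rows : List (String × String × String)) (hnd : (rows.map (·.1)).Nodup) :
    ∀ (cs : List (List (String × Option String))) (changed : Int),
    pvOuterA rows cs changed = changed + pvCount rows cs := by
  induction rows with
  | nil => intro cs changed; simp [pvOuterA, pvCount]
  | cons r rows ih =>
    obtain ⟨rid, mid, pyt⟩ := r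
    simp only [List.map_cons, List.nodup_cons] at hnd
    intro cs changed
    simp only [pvOuterA]
    rw [ih hnd.2]
    have hpres : pvCount rows (pvInnerA rid mid pyt cs).1 = pvCount rows cs := by
      apply pvCount_congr
      intro r' hr'
      apply pvInnerA_preserve
      intro hEq
      exact hnd.1 (hEq ▸ List.mem_map_of_mem hr')
    rw [hpres, pvInnerA_fired]
    unfold pvCount
    by_cases hany : cs.any (fun c => pvMatch c rid) = true
    · simp [hany]; omega
    · simp only [Bool.not_eq_true] at hany
      simp [hany]

lemma pvCount_aux (l : List String) (v : String) (p : String → Bool)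
    (hnd : l.Nodup) (hv : v ∈ l) :
    (l.filter (fun k => (k == v) || p k)).length
      = 1 + ((l.filter (fun k => !(k == v))).filter p).length := by
  induction l with
  | nil => cases hv
  | cons a l ih =>
    rcases List.nodup_cons.mp hnd with ⟨ha, hl⟩
    by_cases hav : a = v
    · subst hav
      have hnv : ∀ k ∈ l, k ≠ a := fun k hk hEq => ha (hEq ▸ hk)
      have h1 : l.filter (fun k => (k == a) || p k) = l.filter p := by
        apply List.filter_congr
        intro k hk; simp [hnv k hk]
      have h2 : l.filter (fun k => !(k == a)) = l := by
        apply List.filter_eq_self.mpr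
        intro k hk; simp [hnv k hk]
      simp [h1, h2]
      omega
    · have hv' : v ∈ l := by
        rcases List.mem_cons.mp hv with h | h
        · exact absurd h.symm hav
        · exact h
      by_cases hpa : p a = true
      · simp [hav, hpa, ih hl hv']
        omega
      · simp only [Bool.not_eq_true] at hpa
        simp [hav, hpa, ih hl hv']

lemma pvLoopB_eq (cs : List (List (String × Option String))) :
    ∀ (d : PySem.Dict String (String × String)) (changed : Int), (d.keys).Nodup →
    pvLoopB d changed cs
      = changed + (((d.keys).filter (fun k => cs.any (fun c => pvMatch c k))).length : Int) := by
  induction cs with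
  | nil => intro d changed _; simp [pvLoopB]
  | cons c rest ih =>
    intro d changed hnd
    by_cases hst : (PySem.Dict.mk c).get? "status" ≠ some (some "pending")
    · have hall : ∀ k, pvMatch c k = false := by
        intro k; simp only [pvMatch]; simp [hst]
      simp only [pvLoopB, if_pos hst]
      rw [ih d changed hnd]
      congr 3
      apply List.filter_congr
      intro k _; simp [hall k]
    · have hif : ¬ ((PySem.Dict.mk c).get? "status" ≠ some (some "pending")) := hst
      push Not at hst
      rcases hid : (PySem.Dict.mk c).get? "id" with _ | v
      · have hall : ∀ k, pvMatch c k = false := by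
          intro k; simp only [pvMatch, hid]; simp
        simp only [pvLoopB, if_neg hif, hid]
        rw [ih d changed hnd]
        congr 3
        apply List.filter_congr
        intro k _; simp [hall k]
      · rcases v with _ | v
        · have hall : ∀ k, pvMatch c k = false := by
            intro k; simp only [pvMatch, hid]; simp
          simp only [pvLoopB, if_neg hif, hid]
          rw [ih d changed hnd]
          congr 3
          apply List.filter_congr
          intro k _; simp [hall k]
        · have hmc : ∀ k, pvMatch c k = (k == v) := by
            intro k
            simp only [pvMatch, hid, hst]
            by_cases hkv : k = v
            · simp [hkv]
            · simp [hkv]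
              intro h; exact hkv h.symm
          have hpred : (d.keys).filter (fun k => (c :: rest).any (fun c' => pvMatch c' k))
              = (d.keys).filter (fun k => (k == v) || rest.any (fun c' => pvMatch c' k)) := by
            apply List.filter_congr
            intro k _; simp [List.any_cons, hmc k]
          rcases hpop : d.pop? v with _ | ⟨w, d'⟩
          · have hvk : v ∉ d.keys := by
              intro hmem
              have hc : d.contains v = true := (PySem.Dict.contains_iff_mem_keys _ _).mpr hmem
              rcases hg : d.get? v with _ | u
              · rw [PySem.Dict.contains_eq_isSome_get?, hg] at hc; simp at hc
              · simp [PySem.Dict.pop?, hg] at hpop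
            simp only [pvLoopB, if_neg hif, hid, hpop]
            rw [ih d changed hnd]
            congr 3
            apply List.filter_congr
            intro k hk
            have hkv : k ≠ v := fun h => hvk (h ▸ hk)
            simp [List.any_cons, hmc k, hkv]
          · obtain ⟨hd', hvk⟩ : d' = d.erase v ∧ v ∈ d.keys := by
              simp only [PySem.Dict.pop?] at hpop
              rcases hg : d.get? v with _ | u
              · simp [hg] at hpop
              · simp [hg] at hpop
                refine ⟨hpop.2.symm, ?_⟩
                apply (PySem.Dict.contains_iff_mem_keys _ _).mp
                rw [PySem.Dict.contains_eq_isSome_get?, hg]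
                rfl
            have hkeys : d'.keys = (d.keys).filter (fun k => !(k == v)) := by
              rw [hd']
              simp only [PySem.Dict.erase, PySem.Dict.keys]
              rw [List.filter_map]
              rfl
            have hnd' : d'.keys.Nodup := by rw [hkeys]; exact hnd.filter _
            simp only [pvLoopB, if_neg hif, hid, hpop]
            rw [ih d' (changed + 1) hnd', hpred,
                pvCount_aux d.keys v (fun k => rest.any (fun c' => pvMatch c' k)) hnd hvk, hkeys]
            push_cast
            ring

set_option maxRecDepth 40000 in
lemma pvKeysD0 :
    (pvRows.foldl (fun d r => d.insert r.1 (r.2.1, r.2.2)) PySem.Dict.empty).keys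
      = pvRows.map (·.1) := by decide

set_option maxRecDepth 40000 in
lemma pvRowsNodup : (pvRows.map (·.1)).Nodup := by decide

-- ===== VERDICT (by name: the statement is the Claim_ definition above) =====
theorem patch_wave_burndown_v8_react_manifest_slices_py_spec : Claim_equal_patch_wave_burndown_v8_react_manifest_slices_py := by
  intro cases _
  unfold Spec_patch_wave_burndown_v8_react_manifest_slices_py
    patch_wave_burndown_v8_react_manifest_slices_py
    patch_wave_burndown_v8_react_manifest_slices_py_alt
  rw [pvOuterA_eq pvRows pvRowsNodup cases 0,
      pvLoopB_eq cases _ 0 (by rw [pvKeysD0]; exact pvRowsNodup)]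
  rw [pvKeysD0]
  unfold pvCount
  rw [List.filter_map, List.length_map]
  rfl
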